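-- pv_equiv track=rewrite | github.com/cocofee/auto-quota | tools/batch_fix_experience.py | lookup_dn
-- ===== SOURCE A (Python) =====
-- def lookup_dn(table, names_table, dn):
--     """根据DN从取档表中查找对应的定额编号和名称"""
--     if dn is None:
--         return None, None
--     # 找最近的大于等于dn的档位
--     for threshold in sorted(table.keys()):
--         if dn <= threshold:
--             code = table[threshold]
--             return code, names_table.get(code, "")
--     # 超出范围取最大档
--     max_key = max(table.keys())
--     code = table[max_key]
--     return code, names_table.get(code, "")
-- ===== SOURCE B (Python) =====
-- def lookup_dn(table, names_table, dn):
--     """根据DN从取档表中查找对应的定额编号和名称"""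
--     if dn is None:
--         return None, None
--     # one pass over the items, no sort: track the smallest key >= dn and the overall largest key
--     best = None      # (key, code) with key >= dn and the smallest such key
--     largest = None   # (key, code) with the largest key seen
--     for key, code in table.items():
--         if key >= dn and (best is None or key <= best[0]):
--             best = (key, code)
--         if largest is None or key >= largest[0]:
--             largest = (key, code)
--     code = best[1] if best is not None else largest[1]
--     return code, names_table.get(code, "")
-- ===== Notes on version B (the rewrite author's own statement) =====
-- stated objective: faster
-- what changed: Replaces A's sort-the-keys-then-scan-for-the-first-threshold (and a separate max() pass) with one linear pass over the items that maintains two accumulators: the smallest key >= dn and the overall largest key; no sort is performed.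
import Mathlib
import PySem

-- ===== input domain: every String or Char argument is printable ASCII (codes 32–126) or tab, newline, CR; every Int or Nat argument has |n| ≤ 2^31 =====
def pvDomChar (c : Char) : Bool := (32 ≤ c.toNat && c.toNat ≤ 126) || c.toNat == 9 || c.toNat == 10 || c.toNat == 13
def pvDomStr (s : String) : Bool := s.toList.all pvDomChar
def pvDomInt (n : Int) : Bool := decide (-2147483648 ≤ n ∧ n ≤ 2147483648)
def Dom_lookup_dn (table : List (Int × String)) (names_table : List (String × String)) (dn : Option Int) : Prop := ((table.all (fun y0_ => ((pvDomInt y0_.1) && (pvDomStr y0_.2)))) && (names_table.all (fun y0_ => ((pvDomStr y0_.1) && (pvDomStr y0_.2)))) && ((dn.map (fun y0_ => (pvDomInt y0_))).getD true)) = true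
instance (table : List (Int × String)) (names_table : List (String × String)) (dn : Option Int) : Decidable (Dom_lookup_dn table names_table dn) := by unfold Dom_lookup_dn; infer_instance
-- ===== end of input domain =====

-- B replaces A's sort-then-scan over the keys (plus a separate max pass) by ONE linear pass
-- over the items with two accumulators (smallest key ≥ dn, largest key): faster, no sort.


-- ===== PORT A =====
-- sorted(table.keys()) then first threshold with dn <= threshold (early-return loop = find?);
-- else max(table.keys()).  table[threshold] always hits (threshold ∈ keys): the `none` arms
-- are totality fallbacks for lookups Python never fails on; the empty-table max() raise is
-- excluded by Pre_.
def lookup_dn (table : List (Int × String)) (names_table : List (String × String)) (dn : Option Int) : Option String × Option String :=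
  match dn with
  | none => (none, none)
  | some d =>
    let t := PySem.Dict.ofList table
    let nt := PySem.Dict.ofList names_table
    match (PySem.List.sorted t.keys (fun x => x) false).find? (fun threshold => decide (d ≤ threshold)) with
    | some threshold =>
      match t.get? threshold with
      | some code => (some code, some (nt.getD code ""))
      | none => (none, none)
    | none =>
      match PySem.List.max? t.keys (fun x => x) with
      | some maxKey =>
        match t.get? maxKey with
        | some code => (some code, some (nt.getD code ""))
        | none => (none, none)
      | none => (none, none)

-- ===== PORT B =====
-- one pass over the dict's items, two accumulators: `best` = the pair with the smallest
-- key ≥ dn seen so far, `largest` = the pair with the largest key seen so far; no sort.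
def pvBestStep (d : Int) (b : Option (Int × String)) (p : Int × String) : Option (Int × String) :=
  if decide (d ≤ p.1) && (match b with | none => true | some q => decide (p.1 ≤ q.1)) then some p else b

def pvMaxStep (b : Option (Int × String)) (p : Int × String) : Option (Int × String) :=
  if (match b with | none => true | some q => decide (q.1 ≤ p.1)) then some p else b

def lookup_dn_alt (table : List (Int × String)) (names_table : List (String × String)) (dn : Option Int) : Option String × Option String :=
  match dn with
  | none => (none, none)
  | some d =>
    let bm := (PySem.Dict.ofList table).items.foldl
      (fun bm p => (pvBestStep d bm.1 p, pvMaxStep bm.2 p)) (none, none)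
    match bm.1 with
    | some (_, code) => (some code, some ((PySem.Dict.ofList names_table).getD code ""))
    | none =>
      match bm.2 with
      | some (_, code) => (some code, some ((PySem.Dict.ofList names_table).getD code ""))
      | none => (none, none)

-- ===== PRECONDITION & SPEC =====
-- Pre_ excludes only the inputs where Python A raises: an empty table with dn not None
-- (max() of an empty sequence raises ValueError; B raises there too).
def Pre_lookup_dn (table : List (Int × String)) (names_table : List (String × String)) (dn : Option Int) : Prop :=
  dn = none ∨ table ≠ []
instance (table : List (Int × String)) (names_table : List (String × String)) (dn : Option Int) : Decidable (Pre_lookup_dn table names_table dn) := by unfold Pre_lookup_dn; infer_instance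
def pvWitness_lookup_dn : (List (Int × String)) × (List (String × String)) × Option Int :=
  ([(10, "A"), (20, "B")], [("A", "ten"), ("B", "twenty")], some 15)
def Spec_lookup_dn (table : List (Int × String)) (names_table : List (String × String)) (dn : Option Int) (out : Option String × Option String) : Prop := out = lookup_dn_alt table names_table dn
instance (table : List (Int × String)) (names_table : List (String × String)) (dn : Option Int) (out : Option String × Option String) : Decidable (Spec_lookup_dn table names_table dn out) := by unfold Spec_lookup_dn; infer_instance

-- ===== CLAIM (what is proved, stated in full; the proofs are below) =====
def Claim_equal_lookup_dn : Prop := ∀ (table : List (Int × String)) (names_table : List (String × String)) (dn : Option Int), Dom_lookup_dn table names_table dn → Pre_lookup_dn table names_table dn → Spec_lookup_dn table names_table dn (lookup_dn table names_table dn)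

-- ===== LEMMAS AND PROOFS =====

-- the first element of a ≤-sorted list satisfying d ≤ · is ≤ every element satisfying d ≤ ·
theorem find_pairwise_min (s : List Int) (d m : Int)
    (hp : s.Pairwise (fun a b => a ≤ b))
    (h : s.find? (fun t => decide (d ≤ t)) = some m) :
    ∀ y ∈ s, d ≤ y → m ≤ y := by
  induction s with
  | nil => simp at h
  | cons a tl ih =>
    rcases List.pairwise_cons.mp hp with ⟨ha, htl⟩
    by_cases hda : d ≤ a
    · have hm : m = a := by simp [List.find?, hda] at h; omega
      subst hm
      intro y hy _
      rcases List.mem_cons.mp hy with rfl | hy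
      · exact le_refl _
      · exact ha y hy
    · rw [List.find?_cons_of_neg (by simpa using hda)] at h
      intro y hy hdy
      rcases List.mem_cons.mp hy with rfl | hy
      · exact absurd hdy hda
      · exact ih htl h y hy hdy

-- find? over sorted(l) with predicate (d ≤ ·) = min? of the matching elements of l
theorem find_sorted_eq_min (l : List Int) (d : Int) :
    (PySem.List.sorted l (fun x => x) false).find? (fun t => decide (d ≤ t)) =
    PySem.List.min? (l.filter (fun k => decide (d ≤ k))) (fun x => x) := by
  have hperm := PySem.List.sorted_perm l (fun x => x) false
  have hpair : (PySem.List.sorted l (fun x => x) false).Pairwise (fun a b => a ≤ b) :=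
    PySem.List.sorted_pairwise l (fun x => x)
  rcases hL : (PySem.List.sorted l (fun x => x) false).find? (fun t => decide (d ≤ t)) with _ | m
  · have hnone : ∀ y ∈ l, ¬ d ≤ y := by
      intro y hy hdy
      have hy' : y ∈ PySem.List.sorted l (fun x => x) false := hperm.mem_iff.mpr hy
      have := List.find?_eq_none.mp hL y hy'
      simp [hdy] at this
    have : l.filter (fun k => decide (d ≤ k)) = [] := by
      apply List.filter_eq_nil_iff.mpr
      intro a ha
      simpa using hnone a ha
    rw [this]
    simp [PySem.List.min?]
  · have hm_mem : m ∈ l := hperm.mem_iff.mp (List.mem_of_find?_eq_some hL)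
    have hdm : d ≤ m := by have := List.find?_some hL; simpa using this
    have hmin : ∀ y ∈ l, d ≤ y → m ≤ y := by
      intro y hy hdy
      exact find_pairwise_min _ d m hpair hL y (hperm.mem_iff.mpr hy) hdy
    have hmf : m ∈ l.filter (fun k => decide (d ≤ k)) :=
      List.mem_filter.mpr ⟨hm_mem, by simpa using hdm⟩
    rcases hR : PySem.List.min? (l.filter (fun k => decide (d ≤ k))) (fun x => x) with _ | m'
    · rw [PySem.List.min?_eq_none_iff] at hR
      rw [hR] at hmf; simp at hmf
    · have hm'f := PySem.List.min?_mem hR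
      rcases List.mem_filter.mp hm'f with ⟨hm'l, hdm'⟩
      have h1 : m' ≤ m := PySem.List.min?_isMin hR m hmf
      have h2 : m ≤ m' := hmin m' hm'l (by simpa using hdm')
      have : m = m' := le_antisymm h2 h1
      simp [this]

-- the `best` accumulator: none ↔ no pair has key ≥ d; some q → q is a pair of minimal key ≥ d
theorem best_fold (d : Int) (L : List (Int × String)) :
    (match L.foldl (pvBestStep d) none with
     | none => L.filter (fun p => decide (d ≤ p.1)) = []
     | some q => q ∈ L ∧ d ≤ q.1 ∧ ∀ p ∈ L, d ≤ p.1 → q.1 ≤ p.1) := by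
  induction L using List.reverseRecOn with
  | nil => simp
  | append_singleton L p ih =>
    rw [List.foldl_append, List.foldl_cons, List.foldl_nil]
    rcases hb : L.foldl (pvBestStep d) none with _ | q <;> rw [hb] at ih
    · by_cases hdp : d ≤ p.1
      · have hstep : pvBestStep d none p = some p := by simp [pvBestStep, hdp]
        rw [hstep]
        refine ⟨by simp, hdp, ?_⟩
        intro x hx hdx
        rcases List.mem_append.mp hx with hx | hx
        · have := List.filter_eq_nil_iff.mp ih x hx
          simp at this
          omega
        · simp at hx; subst hx; exact le_refl _
      · have hstep : pvBestStep d none p = none := by simp [pvBestStep, hdp]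
        rw [hstep, List.filter_append, ih]
        simp [hdp]
    · obtain ⟨hqL, hdq, hqmin⟩ := ih
      by_cases hcond : d ≤ p.1 ∧ p.1 ≤ q.1
      · have hstep : pvBestStep d (some q) p = some p := by
          simp [pvBestStep, hcond.1, hcond.2]
        rw [hstep]
        refine ⟨by simp, hcond.1, ?_⟩
        intro x hx hdx
        rcases List.mem_append.mp hx with hx | hx
        · exact le_trans hcond.2 (hqmin x hx hdx)
        · simp at hx; subst hx; exact le_refl _
      · have hstep : pvBestStep d (some q) p = some q := by
          unfold pvBestStep
          rw [if_neg]
          simp only [Bool.and_eq_true, decide_eq_true_eq]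
          exact hcond
        rw [hstep]
        refine ⟨List.mem_append_left _ hqL, hdq, ?_⟩
        intro x hx hdx
        rcases List.mem_append.mp hx with hx | hx
        · exact hqmin x hx hdx
        · simp at hx; subst hx
          rcases not_and_or.mp hcond with h | h
          · exact absurd hdx h
          · omega

-- the `largest` accumulator: none ↔ the list is empty; some q → q is a pair of maximal key
theorem max_fold (L : List (Int × String)) :
    (match L.foldl pvMaxStep none with
     | none => L = []
     | some q => q ∈ L ∧ ∀ p ∈ L, p.1 ≤ q.1) := by
  induction L using List.reverseRecOn with
  | nil => simp
  | append_singleton L p ih =>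
    rw [List.foldl_append, List.foldl_cons, List.foldl_nil]
    rcases hb : L.foldl pvMaxStep none with _ | q <;> rw [hb] at ih
    · subst ih
      have hstep : pvMaxStep none p = some p := by simp [pvMaxStep]
      rw [hstep]
      exact ⟨by simp, by intro x hx; simp at hx; subst hx; exact le_refl _⟩
    · obtain ⟨hqL, hqmax⟩ := ih
      by_cases hcond : q.1 ≤ p.1
      · have hstep : pvMaxStep (some q) p = some p := by simp [pvMaxStep, hcond]
        rw [hstep]
        refine ⟨by simp, ?_⟩
        intro x hx
        rcases List.mem_append.mp hx with hx | hx
        · exact le_trans (hqmax x hx) hcond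
        · simp at hx; subst hx; exact le_refl _
      · have hstep : pvMaxStep (some q) p = some q := by simp [pvMaxStep, hcond]
        rw [hstep]
        refine ⟨List.mem_append_left _ hqL, ?_⟩
        intro x hx
        rcases List.mem_append.mp hx with hx | hx
        · exact hqmax x hx
        · simp at hx; subst hx; omega

-- ===== VERDICT (by name: the statement is the Claim_ definition above) =====
theorem lookup_dn_spec : Claim_equal_lookup_dn := by
  intro table names_table dn _ _
  unfold Spec_lookup_dn
  cases dn with
  | none => rfl
  | some d =>
    simp only [lookup_dn, lookup_dn_alt]
    rw [find_sorted_eq_min, PySem.List.foldl_prod_mk]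
    set t := PySem.Dict.ofList table with ht
    have hkeys : t.keys = t.items.map Prod.fst := rfl
    have hnd : t.keys.Nodup := PySem.Dict.nodup_keys_ofList table
    have hbest := best_fold d t.items
    have hmax := max_fold t.items
    rcases hb : t.items.foldl (pvBestStep d) none with _ | ⟨k, c⟩ <;> rw [hb] at hbest
    · have helig : t.keys.filter (fun x => decide (d ≤ x)) = [] := by
        rw [hkeys, List.filter_map, Function.comp_def, hbest]
        rfl
      rw [helig]
      rcases hm : t.items.foldl pvMaxStep none with _ | ⟨k, c⟩ <;> rw [hm] at hmax
      · have hk0 : t.keys = [] := by rw [hkeys, hmax]; rfl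
        rw [hk0]
        rfl
      · obtain ⟨hqL, hqmax⟩ := hmax
        have hq1 : k ∈ t.keys := by
          rw [hkeys]; exact List.mem_map_of_mem hqL
        rcases hM : PySem.List.max? t.keys (fun x => x) with _ | M
        · rw [PySem.List.max?_eq_none_iff] at hM
          rw [hM] at hq1; simp at hq1
        · have hMmem := PySem.List.max?_mem hM
          rcases List.mem_map.mp (hkeys ▸ hMmem) with ⟨x, hxL, hxM⟩
          have h1 : M ≤ k := hxM ▸ hqmax x hxL
          have h2 : k ≤ M := PySem.List.max?_isMax hM k hq1
          have hMq : M = k := le_antisymm h1 h2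
          have hget : t.get? k = some c := PySem.Dict.get?_of_mem_items t hqL hnd
          rw [hMq]
          simp [PySem.List.min?, hget]
    · obtain ⟨hqL, hdq, hqmin⟩ := hbest
      have hq1 : k ∈ t.keys.filter (fun x => decide (d ≤ x)) := by
        refine List.mem_filter.mpr ⟨?_, by simpa using hdq⟩
        rw [hkeys]; exact List.mem_map_of_mem hqL
      rcases hM : PySem.List.min? (t.keys.filter (fun x => decide (d ≤ x))) (fun x => x) with _ | m
      · rw [PySem.List.min?_eq_none_iff] at hM
        rw [hM] at hq1; simp at hq1
      · have hmmem := PySem.List.min?_mem hM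
        rcases List.mem_filter.mp hmmem with ⟨hmk, hdm⟩
        rcases List.mem_map.mp (hkeys ▸ hmk) with ⟨x, hxL, hxm⟩
        have h1 : k ≤ m := hxm ▸ hqmin x hxL (by rw [hxm]; simpa using hdm)
        have h2 : m ≤ k := PySem.List.min?_isMin hM k hq1
        have hmq : m = k := le_antisymm h2 h1
        have hget : t.get? k = some c := PySem.Dict.get?_of_mem_items t hqL hnd
        rw [hmq]
        simp [hget]
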